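-- pv_equiv track=rewrite | github.com/kkkqkx123/open-agent | src/infrastructure/graph/workflow_validator.py | _is_terminal_node_from_dict
-- ===== SOURCE A (Python) =====
-- from typing import List, Dict, Any, Optional, Set
--
-- def _is_terminal_node_from_dict(node_name: str, config_data: Dict[str, Any]) -> bool:
--     """判断是否是终端节点"""
--     # 检查节点名称是否包含结束相关关键词
--     terminal_keywords = ["end", "finish", "complete", "final", "terminal", "exit"]
--     node_lower = node_name.lower()
--
--     for keyword in terminal_keywords:
--         if keyword in node_lower:
--             return True
--
--     # 检查节点配置
--     nodes = config_data.get("nodes", {})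
--     if node_name in nodes:
--         node_config = nodes[node_name]
--         description = node_config.get("description", "").lower()
--         for keyword in terminal_keywords:
--             if keyword in description:
--                 return True
--
--     return False
-- ===== SOURCE B (Python) =====
-- # First-character dispatch table: at each text position only keywords starting
-- # with that character are candidates.
-- _TERMINAL_DISPATCH = {
--     "c": ("complete",),
--     "e": ("end", "exit"),
--     "f": ("finish", "final"),
--     "t": ("terminal",),
-- }
--
-- def _is_terminal_node_from_dict(node_name: str, config_data) -> bool:
--     """判断是否是终端节点"""
--     texts = [node_name]
--     nodes = config_data.get("nodes", {})
--     if node_name in nodes: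
--         texts.append(nodes[node_name].get("description", ""))
--     for text in texts:
--         t = text.lower()
--         for i, ch in enumerate(t):
--             for kw in _TERMINAL_DISPATCH.get(ch, ()):
--                 if t.startswith(kw, i):
--                     return True
--     return False
-- ===== Notes on version B (the rewrite author's own statement) =====
-- stated objective: alternative
-- what changed: B replaces A's keyword-major substring ('in') loops by a single position-major scan of each lowered text, using a first-character dispatch table so that at each position only the keywords starting with the current character are tested with startswith(kw, i).
import Mathlib
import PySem

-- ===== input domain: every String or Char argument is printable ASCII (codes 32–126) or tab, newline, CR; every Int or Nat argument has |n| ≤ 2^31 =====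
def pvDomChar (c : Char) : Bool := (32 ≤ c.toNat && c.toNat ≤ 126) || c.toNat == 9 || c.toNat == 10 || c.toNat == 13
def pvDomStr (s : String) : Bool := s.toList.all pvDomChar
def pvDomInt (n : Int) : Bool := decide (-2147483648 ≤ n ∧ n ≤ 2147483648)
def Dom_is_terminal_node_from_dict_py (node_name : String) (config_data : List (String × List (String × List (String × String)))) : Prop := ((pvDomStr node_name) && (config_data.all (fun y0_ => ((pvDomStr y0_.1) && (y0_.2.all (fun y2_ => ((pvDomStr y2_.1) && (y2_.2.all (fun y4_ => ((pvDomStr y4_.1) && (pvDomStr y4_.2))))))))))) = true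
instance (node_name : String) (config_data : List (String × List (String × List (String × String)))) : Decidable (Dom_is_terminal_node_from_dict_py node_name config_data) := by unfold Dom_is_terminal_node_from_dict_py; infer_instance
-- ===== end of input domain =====

-- B replaces A's keyword-major substring loops by a single position-major scan of each
-- lowered text with a first-character dispatch table (objective: alternative).

def pvTerminalKeywords : List String := ["end", "finish", "complete", "final", "terminal", "exit"]

-- ===== PORT A =====
-- literal transliteration: two early-return keyword loops, rendered as List.any over the same list
def is_terminal_node_from_dict_py (node_name : String) (config_data : List (String × List (String × List (String × String)))) : Bool :=
  let node_lower := PySem.Str.lower node_name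
  if pvTerminalKeywords.any (fun kw => PySem.Str.isIn kw node_lower) then
    true
  else
    let nodes := (PySem.Dict.mk config_data).getD "nodes" []
    if (PySem.Dict.mk nodes).contains node_name then
      let node_config := (PySem.Dict.mk nodes).getD node_name []
      let description := PySem.Str.lower ((PySem.Dict.mk node_config).getD "description" "")
      pvTerminalKeywords.any (fun kw => PySem.Str.isIn kw description)
    else
      false

-- ===== PORT B =====
-- the _TERMINAL_DISPATCH table of Source B
def pvDispatch (c : Char) : List String :=
  if c = 'c' then ["complete"]
  else if c = 'e' then ["end", "exit"]
  else if c = 'f' then ["finish", "final"]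
  else if c = 't' then ["terminal"]
  else []

-- the position-major scan: at each position test only the dispatched keywords (startswith at i)
def pvScan : List Char → Bool
  | [] => false
  | c :: rest => (pvDispatch c).any (fun kw => kw.toList.isPrefixOf (c :: rest)) || pvScan rest

def is_terminal_node_from_dict_py_alt (node_name : String) (config_data : List (String × List (String × List (String × String)))) : Bool :=
  let nodes := (PySem.Dict.mk config_data).getD "nodes" []
  let texts :=
    if (PySem.Dict.mk nodes).contains node_name then
      [node_name, (PySem.Dict.mk ((PySem.Dict.mk nodes).getD node_name [])).getD "description" ""]
    else
      [node_name]
  texts.any (fun text => pvScan (PySem.Str.lower text).toList)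

-- ===== PRECONDITION & SPEC =====
def Spec_is_terminal_node_from_dict_py (node_name : String) (config_data : List (String × List (String × List (String × String)))) (out : Bool) : Prop := out = is_terminal_node_from_dict_py_alt node_name config_data
instance (node_name : String) (config_data : List (String × List (String × List (String × String)))) (out : Bool) : Decidable (Spec_is_terminal_node_from_dict_py node_name config_data out) := by unfold Spec_is_terminal_node_from_dict_py; infer_instance

-- ===== CLAIM =====
def Claim_equal_is_terminal_node_from_dict_py : Prop := ∀ (node_name : String) (config_data : List (String × List (String × List (String × String)))), Dom_is_terminal_node_from_dict_py node_name config_data → Spec_is_terminal_node_from_dict_py node_name config_data (is_terminal_node_from_dict_py node_name config_data)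

-- ===== LEMMAS AND PROOFS =====

-- the dispatch table is exhaustive: keywords not dispatched at c cannot start at a position holding c
theorem pv_dispatch_any (c : Char) (rest : List Char) :
    (pvDispatch c).any (fun kw => kw.toList.isPrefixOf (c :: rest)) =
      pvTerminalKeywords.any (fun kw => kw.toList.isPrefixOf (c :: rest)) := by
  unfold pvDispatch pvTerminalKeywords
  split_ifs with h1 h2 h3 h4
  · subst h1; simp [List.isPrefixOf, Bool.or_comm]
  · subst h2; simp [List.isPrefixOf, Bool.or_comm]
  · subst h3; simp [List.isPrefixOf, Bool.or_comm]
  · subst h4; simp [List.isPrefixOf, Bool.or_comm]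
  · have e1 : ¬ 'e' = c := fun h => h2 h.symm
    have e2 : ¬ 'f' = c := fun h => h3 h.symm
    have e3 : ¬ 'c' = c := fun h => h1 h.symm
    have e4 : ¬ 't' = c := fun h => h4 h.symm
    simp [Bool.eq_false_iff, ne_eq, List.isPrefixOf_iff_prefix, List.cons_prefix_cons, e1, e2, e3, e4]

-- substring membership in c :: rest = prefix at position 0 or membership in rest
theorem pv_isIn_cons (kw : List Char) (c : Char) (rest : List Char) :
    PySem.Chars.isIn kw (c :: rest) = (kw.isPrefixOf (c :: rest) || PySem.Chars.isIn kw rest) := by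
  cases hp : kw.isPrefixOf (c :: rest) with
  | true =>
    simp only [Bool.true_or]
    exact (PySem.Chars.isIn_iff_infix _ _).mpr (List.IsPrefix.isInfix (List.isPrefixOf_iff_prefix.mp hp))
  | false =>
    simp only [Bool.false_or]
    cases hi : PySem.Chars.isIn kw rest with
    | true =>
      exact (PySem.Chars.isIn_iff_infix _ _).mpr
        (((PySem.Chars.isIn_iff_infix _ _).mp hi).trans (List.suffix_cons c rest).isInfix)
    | false =>
      rw [PySem.Chars.isIn_eq_false_iff] at hi ⊢
      intro h
      rcases List.infix_cons_iff.mp h with h' | h'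
      · simp [List.isPrefixOf_iff_prefix.mpr h'] at hp
      · exact hi h'

-- any respects pointwise equal predicates
theorem pv_any_congr {α : Type} (l : List α) (f g : α → Bool) (h : ∀ a, f a = g a) :
    l.any f = l.any g := by
  induction l with
  | nil => rfl
  | cons x xs ih => simp only [List.any_cons, h, ih]

-- any distributes over || pointwise
theorem pv_any_or {α : Type} (l : List α) (f g : α → Bool) :
    l.any (fun x => f x || g x) = (l.any f || l.any g) := by
  induction l with
  | nil => rfl
  | cons x xs ih =>
    simp only [List.any_cons, ih]
    cases f x <;> cases g x <;> cases xs.any f <;> cases xs.any g <;> rfl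

-- the scan finds exactly the keywords occurring as substrings
theorem pv_scan_eq (l : List Char) :
    pvScan l = pvTerminalKeywords.any (fun kw => PySem.Chars.isIn kw.toList l) := by
  induction l with
  | nil => decide
  | cons c rest ih =>
    have : pvTerminalKeywords.any (fun kw => PySem.Chars.isIn kw.toList (c :: rest)) =
        (pvTerminalKeywords.any (fun kw => kw.toList.isPrefixOf (c :: rest)) ||
         pvTerminalKeywords.any (fun kw => PySem.Chars.isIn kw.toList rest)) := by
      rw [← pv_any_or]
      exact pv_any_congr _ _ _ (fun kw => pv_isIn_cons kw.toList c rest)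
    rw [this, pvScan, pv_dispatch_any, ih]

-- String-level restatement of pv_scan_eq
theorem pv_scan_str (s : String) :
    pvScan s.toList = pvTerminalKeywords.any (fun kw => PySem.Str.isIn kw s) := by
  rw [pv_scan_eq]
  exact pv_any_congr _ _ _ (fun kw => (PySem.Str.isIn_eq kw s).symm)

-- ===== VERDICT =====
theorem is_terminal_node_from_dict_py_spec : Claim_equal_is_terminal_node_from_dict_py := by
  intro node_name config_data _
  unfold Spec_is_terminal_node_from_dict_py
  unfold is_terminal_node_from_dict_py is_terminal_node_from_dict_py_alt
  cases hcont : (PySem.Dict.mk ((PySem.Dict.mk config_data).getD "nodes" [])).contains node_name with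
  | false =>
    simp only [hcont, Bool.false_eq_true, if_false, List.any_cons, List.any_nil, Bool.or_false,
      pv_scan_str]
    cases pvTerminalKeywords.any (fun kw => PySem.Str.isIn kw (PySem.Str.lower node_name)) <;> simp
  | true =>
    simp only [hcont, if_true, List.any_cons, List.any_nil, Bool.or_false, pv_scan_str]
    cases pvTerminalKeywords.any (fun kw => PySem.Str.isIn kw (PySem.Str.lower node_name)) <;> simp
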